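-- pv_equiv track=rewrite | github.com/madswt/StrucLCA | StrucLCA/steel.py | find_index_of_max_value_below_threshold
-- ===== SOURCE A (Python) =====
-- def find_index_of_max_value_below_threshold(lst, threshold1):
--     max_value = float('-inf')
--     max_index = -1
--     for i, value in enumerate(lst):
--         if value < threshold1 and value > max_value:
--             max_value = value
--             max_index = i
--     return max_index
-- ===== SOURCE B (Python) =====
-- def find_index_of_max_value_below_threshold(lst, threshold1):
--     cands = [v for v in lst if v < threshold1]
--     if not cands:
--         return -1
--     return lst.index(max(cands))
-- ===== Notes on version B (the rewrite author's own statement) =====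
-- stated objective: simpler
-- what changed: Replaces the fused tracking scan (running max value + index in one loop) by a three-step decomposition: filter the qualifying values, take their max, then look up its first index with lst.index.
import Mathlib
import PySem

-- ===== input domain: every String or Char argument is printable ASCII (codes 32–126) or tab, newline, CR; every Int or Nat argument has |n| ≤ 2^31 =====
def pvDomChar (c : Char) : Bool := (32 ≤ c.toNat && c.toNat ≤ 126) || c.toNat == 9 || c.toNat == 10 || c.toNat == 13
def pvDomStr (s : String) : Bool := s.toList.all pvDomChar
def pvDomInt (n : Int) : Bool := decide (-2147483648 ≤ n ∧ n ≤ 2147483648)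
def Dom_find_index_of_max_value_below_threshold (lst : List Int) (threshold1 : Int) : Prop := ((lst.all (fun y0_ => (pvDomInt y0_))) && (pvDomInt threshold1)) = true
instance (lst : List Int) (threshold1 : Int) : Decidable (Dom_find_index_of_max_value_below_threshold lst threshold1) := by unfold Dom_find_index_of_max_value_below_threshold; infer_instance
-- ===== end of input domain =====

-- B replaces A's fused tracking loop by filter → max → first-index lookup (objective: simpler decomposition).

-- ===== PORT A =====
-- float('-inf') is modelled as `none`: `pyGtNegInf mv v` is Python's `v > max_value`.
def pyGtNegInf (mv : Option Int) (v : Int) : Bool :=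
  match mv with
  | none => true
  | some m => decide (m < v)

-- the for-loop over enumerate(lst), state (max_value, max_index), i the current index
def fiLoop (threshold1 : Int) : List Int → Int → Option Int → Int → Int
  | [], _, _, max_index => max_index
  | value :: rest, i, max_value, max_index =>
    if decide (value < threshold1) && pyGtNegInf max_value value then
      fiLoop threshold1 rest (i + 1) (some value) i
    else
      fiLoop threshold1 rest (i + 1) max_value max_index

def find_index_of_max_value_below_threshold (lst : List Int) (threshold1 : Int) : Int :=
  fiLoop threshold1 lst 0 none (-1)

-- ===== PORT B =====
def find_index_of_max_value_below_threshold_alt (lst : List Int) (threshold1 : Int) : Int :=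
  let cands := lst.filter (fun v => decide (v < threshold1))
  if cands.isEmpty then -1
  else
    match PySem.List.max? cands (fun x => x) with
    | some m =>
      match PySem.List.index? lst m with
      | some i => (i : Int)
      | none => -1   -- unreachable: max(cands) is an element of lst
    | none => -1     -- unreachable: cands is nonempty here

-- ===== PRECONDITION & SPEC =====
def Spec_find_index_of_max_value_below_threshold (lst : List Int) (threshold1 : Int) (out : Int) : Prop := out = find_index_of_max_value_below_threshold_alt lst threshold1
instance (lst : List Int) (threshold1 : Int) (out : Int) : Decidable (Spec_find_index_of_max_value_below_threshold lst threshold1 out) := by unfold Spec_find_index_of_max_value_below_threshold; infer_instance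

-- ===== CLAIM (what is proved, stated in full; the proofs are below) =====
def Claim_equal_find_index_of_max_value_below_threshold : Prop := ∀ (lst : List Int) (threshold1 : Int), Dom_find_index_of_max_value_below_threshold lst threshold1 → Spec_find_index_of_max_value_below_threshold lst threshold1 (find_index_of_max_value_below_threshold lst threshold1)

-- ===== LEMMAS AND PROOFS =====

-- proof-side characterisation of A's loop: the best (value, offset) pair in a suffix
def bestOf (t : Int) : List Int → Option (Int × Nat)
  | [] => none
  | x :: xs =>
    if x < t then
      match bestOf t xs with
      | none => some (x, 0)
      | some (v, j) => if v > x then some (v, j + 1) else some (x, 0)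
    else (bestOf t xs).map (fun p => (p.1, p.2 + 1))

theorem fiLoop_eq_bestOf (t : Int) (xs : List Int) : ∀ (i : Int) (mv : Option Int) (mi : Int),
    fiLoop t xs i mv mi =
      match bestOf t xs with
      | none => mi
      | some (v, j) => if pyGtNegInf mv v then i + Int.ofNat j else mi := by
  induction xs with
  | nil => intro i mv mi; simp [fiLoop, bestOf]
  | cons x xs ih =>
    intro i mv mi
    simp only [fiLoop, bestOf]
    by_cases hx : x < t
    · simp only [hx, if_pos, decide_true, Bool.true_and]
      cases hb : bestOf t xs with
      | none =>
        cases mv with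
        | none => simp [pyGtNegInf, ih, hb]
        | some m =>
          by_cases hm : m < x
          · simp [pyGtNegInf, hm, ih, hb]
          · simp [pyGtNegInf, hm, ih, hb]
      | some p =>
        obtain ⟨v, j⟩ := p
        by_cases hvx : v > x
        · simp only [hvx, if_pos]
          cases mv with
          | none => simp [pyGtNegInf, ih, hb, hvx]; ring_nf
          | some m =>
            by_cases hm : m < x
            · have hmv : m < v := lt_trans hm hvx
              simp [pyGtNegInf, hm, ih, hb, hmv, hvx]; ring_nf
            · simp [pyGtNegInf, hm, ih, hb]
              split_ifs <;> ring_nf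
        · simp only [hvx, if_neg, if_false]
          cases mv with
          | none =>
            simp [pyGtNegInf, ih, hb, hvx, not_lt.mp hvx]
          | some m =>
            by_cases hm : m < x
            · simp [pyGtNegInf, hm, ih, hb, hvx, not_lt.mp hvx]
            · have hnv : ¬ m < v := not_lt.mpr (le_trans (not_lt.mp hvx) (not_lt.mp hm))
              simp [pyGtNegInf, hm, ih, hb, hnv]
    · simp only [hx, decide_false, Bool.false_and, if_false, ih]
      cases hb : bestOf t xs with
      | none => simp [hb]
      | some p =>
        obtain ⟨v, j⟩ := p
        cases mv with
        | none => simp [hb, pyGtNegInf]; ring_nf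
        | some m => by_cases hm : m < v <;> simp [hb, pyGtNegInf, hm] <;> ring_nf

theorem bestOf_none_iff (t : Int) (xs : List Int) :
    bestOf t xs = none ↔ xs.filter (fun v => decide (v < t)) = [] := by
  induction xs with
  | nil => simp [bestOf]
  | cons x xs ih =>
    simp only [bestOf, List.filter_cons]
    by_cases hx : x < t
    · simp only [hx, if_pos, decide_true]
      cases hb : bestOf t xs <;> simp [hb]
      · split <;> simp
    · simp [hx, ih]

theorem bestOf_some_props (t : Int) (xs : List Int) (v : Int) (j : Nat)
    (h : bestOf t xs = some (v, j)) :
    v ∈ xs ∧ v < t ∧ (∀ y ∈ xs, y < t → y ≤ v) ∧ PySem.List.index? xs v = some j := by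
  induction xs generalizing v j with
  | nil => simp [bestOf] at h
  | cons x xs ih =>
    simp only [bestOf] at h
    by_cases hx : x < t
    · simp only [hx, if_pos] at h
      cases hb : bestOf t xs with
      | none =>
        rw [hb] at h
        obtain ⟨rfl, rfl⟩ : x = v ∧ 0 = j := by simpa using h
        have hemp := (bestOf_none_iff t xs).mp hb
        refine ⟨List.mem_cons_self, hx, ?_, PySem.List.index?_cons_self x xs⟩
        intro y hy hyt
        rcases List.mem_cons.mp hy with rfl | hy'
        · exact le_refl y
        · exfalso
          have : y ∈ xs.filter (fun v => decide (v < t)) := List.mem_filter.mpr ⟨hy', by simpa using hyt⟩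
          simp [hemp] at this
      | some p =>
        obtain ⟨v', j'⟩ := p
        rw [hb] at h
        obtain ⟨hm', hlt', hmax', hidx'⟩ := ih v' j' hb
        by_cases hvx : v' > x
        · simp only [hvx, if_pos] at h
          obtain ⟨rfl, rfl⟩ : v' = v ∧ j' + 1 = j := by simpa using h
          refine ⟨List.mem_cons_of_mem _ hm', hlt', ?_, ?_⟩
          · intro y hy hyt
            rcases List.mem_cons.mp hy with rfl | hy'
            · exact hvx.le
            · exact hmax' y hy' hyt
          · have hne : x ≠ v' := by omega
            rw [PySem.List.index?_cons_of_ne _ hne, hidx']; rfl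
        · simp only [hvx, if_neg, if_false] at h
          obtain ⟨rfl, rfl⟩ : x = v ∧ 0 = j := by simpa using h
          refine ⟨List.mem_cons_self, hx, ?_, PySem.List.index?_cons_self x xs⟩
          intro y hy hyt
          rcases List.mem_cons.mp hy with rfl | hy'
          · exact le_refl y
          · exact le_trans (hmax' y hy' hyt) (not_lt.mp hvx)
    · simp only [hx, if_neg, if_false] at h
      cases hb : bestOf t xs with
      | none => rw [hb] at h; simp at h
      | some p =>
        obtain ⟨v', j'⟩ := p
        rw [hb] at h
        obtain ⟨rfl, rfl⟩ : v' = v ∧ j' + 1 = j := by simpa using h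
        obtain ⟨hm', hlt', hmax', hidx'⟩ := ih v' j' hb
        refine ⟨List.mem_cons_of_mem _ hm', hlt', ?_, ?_⟩
        · intro y hy hyt
          rcases List.mem_cons.mp hy with rfl | hy'
          · omega
          · exact hmax' y hy' hyt
        · have hne : x ≠ v' := by omega
          rw [PySem.List.index?_cons_of_ne _ hne, hidx']; rfl

-- ===== VERDICT (by name: the statement is the Claim_ definition above) =====
theorem find_index_of_max_value_below_threshold_spec : Claim_equal_find_index_of_max_value_below_threshold := by
  intro lst t _
  unfold Spec_find_index_of_max_value_below_threshold
  unfold find_index_of_max_value_below_threshold find_index_of_max_value_below_threshold_alt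
  rw [fiLoop_eq_bestOf]
  cases hb : bestOf t lst with
  | none =>
    have hf := (bestOf_none_iff t lst).mp hb
    simp [hf]
  | some p =>
    obtain ⟨v, j⟩ := p
    obtain ⟨hm, hlt, hmax, hidx⟩ := bestOf_some_props t lst v j hb
    have hvf : v ∈ lst.filter (fun y => decide (y < t)) := List.mem_filter.mpr ⟨hm, by simpa using hlt⟩
    have hne : ¬ (lst.filter (fun y => decide (y < t))).isEmpty := by
      intro hc; rw [List.isEmpty_iff] at hc; simp [hc] at hvf
    cases hmx : PySem.List.max? (lst.filter (fun y => decide (y < t))) (fun x => x) with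
    | none =>
      exfalso
      rw [PySem.List.max?_eq_none_iff] at hmx
      simp [hmx] at hvf
    | some m =>
      have hmm := PySem.List.max?_mem hmx
      have hmle : m ≤ v := by
        have := List.mem_filter.mp hmm
        exact hmax m this.1 (by simpa using this.2)
      have hvle : v ≤ m := PySem.List.max?_isMax hmx v hvf
      have heq : m = v := le_antisymm hmle hvle
      subst heq
      simp only [hne, if_false, hmx, hidx]
      simp [pyGtNegInf]
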